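-- pv_equiv track=rewrite | github.com/MarcusTL12/School | 18Host/TDT4110/PythonWorkspace/Oving3/Fibb.py | fib_list
-- ===== SOURCE A (Python) =====
-- def fib_list(k: int) -> list:
--     if k <= 0:
--         return []
--     elif k == 1:
--         return [0]
--
--     res = [0] * k
--     res[1] = 1
--
--     if k == 2:
--         return res
--
--     for i in range(2, k):
--         res[i] = res[i - 2] + res[i - 1]
--
--     return res
-- ===== SOURCE B (Python) =====
-- def fib_list(k: int) -> list:
--     if k <= 0:
--         return []
--     fibs = [0, 1]
--     while len(fibs) < k:
--         # doubling round: from [F(0)..F(m-1)] append F(m)..F(2m-2)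
--         # using the addition formula F(j+m) = F(j)*F(m-1) + F(j+1)*F(m)
--         fn = fibs[-1]
--         fm = fibs[-2] + fn
--         fibs += [fibs[j] * fn + fibs[j + 1] * fm for j in range(len(fibs) - 1)]
--     return fibs[:k]
-- ===== Notes on version B (the rewrite author's own statement) =====
-- stated objective: alternative
-- what changed: B replaces A's element-by-element recurrence over a preallocated back-indexed array by a list-doubling algorithm: starting from [0,1] each round appends a whole block F(m)..F(2m-2) at once via the Fibonacci addition formula F(j+m)=F(j)*F(m-1)+F(j+1)*F(m), then truncates to k.
import Mathlib
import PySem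

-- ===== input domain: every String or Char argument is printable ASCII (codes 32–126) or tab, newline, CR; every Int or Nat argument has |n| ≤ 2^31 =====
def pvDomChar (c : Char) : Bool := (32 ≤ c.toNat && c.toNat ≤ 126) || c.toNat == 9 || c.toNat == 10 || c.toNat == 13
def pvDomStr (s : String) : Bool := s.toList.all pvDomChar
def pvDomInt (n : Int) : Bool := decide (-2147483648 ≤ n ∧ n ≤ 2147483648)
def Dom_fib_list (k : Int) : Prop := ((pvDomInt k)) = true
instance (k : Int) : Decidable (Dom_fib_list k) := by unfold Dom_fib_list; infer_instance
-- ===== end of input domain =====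

-- B replaces A's element-by-element recurrence over a preallocated back-indexed array by a
-- list-doubling algorithm: each round appends a whole block F(m)..F(2m-2) at once via the
-- addition formula F(j+m) = F(j)*F(m-1) + F(j+1)*F(m), then truncates to k (alternative).

-- ===== PORT A =====
-- res[i-2], res[i-1] are always in range in the loop (2 ≤ i < k = len res), so the .getD default 0 is never used
def fib_list (k : Int) : List Int :=
  if k ≤ 0 then []
  else if k = 1 then [0]
  else
    let res := (List.replicate k.toNat 0).set 1 1
    if k = 2 then res
    else
      (PySem.List.pyRange 2 k 1).foldl
        (fun res i =>
          res.set i.toNat (PySem.List.pyGetD res (i - 2) 0 + PySem.List.pyGetD res (i - 1) 0))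
        res

-- ===== PORT B =====
-- one doubling round of Source B's while body: fibs[-1], fibs[-2]+fibs[-1], then the comprehension
def fibStep (fibs : List Int) : List Int :=
  let fn := PySem.List.pyGetD fibs (-1) 0
  let fm := PySem.List.pyGetD fibs (-2) 0 + fn
  fibs ++ (PySem.List.pyRange 0 ((fibs.length : Int) - 1) 1).map
    (fun j => PySem.List.pyGetD fibs j 0 * fn + PySem.List.pyGetD fibs (j + 1) 0 * fm)

-- Source B's while loop, made total with fuel (k rounds always suffice: each round grows the list)
def fibGrow (fuel : Nat) (k : Nat) (fibs : List Int) : List Int :=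
  match fuel with
  | 0 => fibs
  | fuel + 1 => if fibs.length < k then fibGrow fuel k (fibStep fibs) else fibs

def fib_list_alt (k : Int) : List Int :=
  if k ≤ 0 then []
  else PySem.List.slice (fibGrow k.toNat k.toNat [0, 1]) none (some k)

-- ===== PRECONDITION & SPEC =====
def Spec_fib_list (k : Int) (out : List Int) : Prop := out = fib_list_alt k
instance (k : Int) (out : List Int) : Decidable (Spec_fib_list k out) := by unfold Spec_fib_list; infer_instance

-- ===== CLAIM (what is proved, stated in full; the proofs are below) =====
def Claim_equal_fib_list : Prop := ∀ (k : Int), Dom_fib_list k → Spec_fib_list k (fib_list k)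

-- ===== LEMMAS AND PROOFS =====

def pvFib : Nat → Int
  | 0 => 0
  | 1 => 1
  | n + 2 => pvFib n + pvFib (n + 1)

def pvFibs (m : Nat) : List Int := (List.range m).map pvFib

lemma pvFib_fib : ∀ n, pvFib n = ((Nat.fib n : Nat) : Int)
  | 0 => rfl
  | 1 => rfl
  | n + 2 => by
      rw [pvFib, pvFib_fib n, pvFib_fib (n + 1), Nat.fib_add_two]
      push_cast; ring

lemma pvFibs_succ (m : Nat) : pvFibs (m + 1) = pvFibs m ++ [pvFib m] := by
  simp [pvFibs, List.range_succ]

-- the addition formula behind Source B's comprehension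
lemma pvFib_addf (t m : Nat) (h : 1 ≤ m) :
    pvFib (t + m) = pvFib t * pvFib (m - 1) + pvFib (t + 1) * pvFib m := by
  obtain ⟨n, rfl⟩ : ∃ n, m = n + 1 := ⟨m - 1, by omega⟩
  simp only [pvFib_fib, Nat.add_sub_cancel]
  rw [show t + (n + 1) = t + n + 1 by omega, Nat.fib_add]
  push_cast; ring

lemma pvFibs_getD (m t : Nat) (ht : t < m) : (pvFibs m).getD t 0 = pvFib t := by
  simpa [pvFibs] using PySem.List.getD_map_range pvFib m t 0 ht

-- one doubling round on the true prefix
lemma fibStep_pvFibs (m : Nat) (h : 2 ≤ m) :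
    fibStep (pvFibs m) = pvFibs (m + (m - 1)) := by
  have hlen : (pvFibs m).length = m := by simp [pvFibs]
  have hfn : PySem.List.pyGetD (pvFibs m) (-1) 0 = pvFib (m - 1) := by
    rw [PySem.List.pyGetD_neg_ofNat (pvFibs m) 1 0 (by omega) (by omega)]
    simp only [hlen]
    simp [pvFibs, List.getElem_map, List.getElem_range]
  have hfm : PySem.List.pyGetD (pvFibs m) (-2) 0 = pvFib (m - 2) := by
    rw [PySem.List.pyGetD_neg_ofNat (pvFibs m) 2 0 (by omega) (by omega)]
    simp only [hlen]
    simp [pvFibs, List.getElem_map, List.getElem_range]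
  have hsum : pvFib (m - 2) + pvFib (m - 1) = pvFib m := by
    obtain ⟨n, rfl⟩ : ∃ n, m = n + 2 := ⟨m - 2, by omega⟩
    simp [pvFib]
  simp only [fibStep, hfn, hfm, hlen]
  rw [hsum]
  rw [show ((m : Int) - 1) = ((m - 1 : Nat) : Int) by omega, PySem.List.pyRange_zero_nat]
  rw [List.map_map]
  simp only [Function.comp_def]
  have hmap : ∀ t ∈ List.range (m - 1),
      PySem.List.pyGetD (pvFibs m) (t : Int) 0 * pvFib (m - 1)
        + PySem.List.pyGetD (pvFibs m) ((t : Int) + 1) 0 * pvFib m = pvFib (m + t) := by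
    intro t ht
    rw [List.mem_range] at ht
    rw [show ((t : Int) + 1) = ((t + 1 : Nat) : Int) by push_cast; ring]
    rw [PySem.List.pyGetD_natCast, PySem.List.pyGetD_natCast,
        pvFibs_getD m t (by omega), pvFibs_getD m (t + 1) (by omega),
        show m + t = t + m by omega, pvFib_addf t m (by omega)]
  rw [List.map_congr_left hmap, pvFibs, pvFibs, List.range_add, List.map_append, List.map_map]
  rfl

-- the while loop reaches length ≥ k given enough fuel
lemma fibGrow_pvFibs : ∀ (fuel k m : Nat), 2 ≤ m → k ≤ fuel + m →
    ∃ m', k ≤ m' ∧ fibGrow fuel k (pvFibs m) = pvFibs m' := by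
  intro fuel
  induction fuel with
  | zero =>
    intro k m h2 hk
    exact ⟨m, by omega, rfl⟩
  | succ fuel ih =>
    intro k m h2 hk
    unfold fibGrow
    by_cases hlt : (pvFibs m).length < k
    · rw [if_pos hlt, fibStep_pvFibs m h2]
      exact ih k (m + (m - 1)) (by omega) (by omega)
    · rw [if_neg hlt]
      have : (pvFibs m).length = m := by simp [pvFibs]
      exact ⟨m, by omega, rfl⟩

lemma pvB_eq (k : Int) : fib_list_alt k = pvFibs k.toNat := by
  unfold fib_list_alt
  split_ifs with h0
  · rw [show k.toNat = 0 by omega]; rfl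
  · have h2 : pvFibs 2 = [0, 1] := rfl
    obtain ⟨m', hk, hgrow⟩ := fibGrow_pvFibs k.toNat k.toNat 2 (by omega) (by omega)
    rw [← h2, hgrow, PySem.List.slice_to _ (by omega), pvFibs, pvFibs,
        ← List.map_take, List.take_range, Nat.min_eq_left hk]

lemma pvA_inv (n : Nat) : ∀ (i : Nat), 2 ≤ i →
    ((PySem.List.pyRange i (i + n) 1).foldl
      (fun res x =>
        res.set x.toNat (PySem.List.pyGetD res (x - 2) 0 + PySem.List.pyGetD res (x - 1) 0))
      (pvFibs i ++ List.replicate n 0)) = pvFibs (i + n) := by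
  induction n with
  | zero => intro i _; simp [PySem.List.pyRange_one_eq_nil]
  | succ n ih =>
    intro i hi
    rw [PySem.List.pyRange_one_cons (by push_cast; omega)]
    have hlen : (pvFibs i).length = i := by simp [pvFibs]
    have hg : ∀ t : Nat, t < i →
        PySem.List.pyGetD (pvFibs i ++ List.replicate (n + 1) 0) ((t : Nat) : Int) 0 = pvFib t := by
      intro t ht
      rw [PySem.List.pyGetD_natCast, List.getD_append _ _ _ _ (by omega)]
      exact pvFibs_getD i t ht
    have hget2 : PySem.List.pyGetD (pvFibs i ++ List.replicate (n + 1) 0) ((i : Int) - 2) 0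
        = pvFib (i - 2) := by
      rw [show ((i : Int) - 2) = ((i - 2 : Nat) : Int) by omega]
      exact hg (i - 2) (by omega)
    have hget1 : PySem.List.pyGetD (pvFibs i ++ List.replicate (n + 1) 0) ((i : Int) - 1) 0
        = pvFib (i - 1) := by
      rw [show ((i : Int) - 1) = ((i - 1 : Nat) : Int) by omega]
      exact hg (i - 1) (by omega)
    have hfib : pvFib (i - 2) + pvFib (i - 1) = pvFib i := by
      obtain ⟨m, rfl⟩ : ∃ m, i = m + 2 := ⟨i - 2, by omega⟩
      simp [pvFib]
    have hset : (pvFibs i ++ List.replicate (n + 1) 0).set ((i : Int)).toNat (pvFib i)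
        = pvFibs (i + 1) ++ List.replicate n 0 := by
      rw [show ((i : Int)).toNat = i by omega, pvFibs_succ,
        List.set_append_right _ _ (by omega)]
      simp [hlen, List.replicate_succ]
    simp only [List.foldl_cons, hget2, hget1, hfib, hset]
    have := ih (i + 1) (by omega)
    rw [show (i : Int) + 1 = ((i + 1 : Nat) : Int) by push_cast; ring,
        show (i : Int) + (((n + 1 : Nat)) : Int) = ((i + 1 : Nat) : Int) + (n : Nat) by push_cast; ring,
        this]
    congr 1
    omega

lemma pvA_eq (k : Int) : fib_list k = pvFibs k.toNat := by
  unfold fib_list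
  split_ifs with h0 h1 h2
  · rw [show k.toNat = 0 by omega]; simp [pvFibs]
  · rw [h1]; simp [pvFibs, List.range_succ, pvFib]
  · rw [h2]; rfl
  · have hk2 : 2 ≤ k.toNat := by omega
    have hinit : (List.replicate k.toNat 0).set 1 1
        = pvFibs 2 ++ List.replicate (k.toNat - 2) (0 : Int) := by
      obtain ⟨m, hm⟩ : ∃ m, k.toNat = m + 2 := ⟨k.toNat - 2, by omega⟩
      rw [hm]
      simp [List.replicate_succ, pvFibs, List.range_succ, pvFib]
    rw [hinit]
    have := pvA_inv (k.toNat - 2) 2 (le_refl 2)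
    rw [show ((2 : Nat) : Int) = (2 : Int) by norm_num,
        show (2 : Int) + ((k.toNat - 2 : Nat) : Int) = k by omega,
        show (2 + (k.toNat - 2)) = k.toNat by omega] at this
    exact this

-- ===== VERDICT (by name: the statement is the Claim_ definition above) =====
theorem fib_list_spec : Claim_equal_fib_list := by
  intro k _
  unfold Spec_fib_list
  rw [pvA_eq, pvB_eq]
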